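-- pv_equiv track=rewrite | github.com/AyoubElAssioui00/End-to-End-Data-Engineering-and-ML-System | scripts/preprocess_cicids2017.py | map_label_simple
-- ===== SOURCE A (Python) =====
-- def map_label_simple(lbl: str) -> str:
--     if lbl is None:
--         return "Other"
--     l = lbl.strip().lower()
--     if l == "benign":
--         return "BENIGN"
--     # DDoS / DoS
--     if any(token in l for token in ["ddos", "distributed", "dos", "hulk", "goldeneye", "slowloris", "slowhttptest"]):
--         # differentiate: labels that explicitly contain 'ddos'
--         if "ddos" in l:
--             return "DDoS"
--         return "DoS"
--     # PortScan
--     if "portscan" in l or "port scan" in l: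
--         return "PortScan"
--     # Bot
--     if "bot" in l:
--         return "Bot"
--     # Brute Force / Patator
--     if any(token in l for token in ["patator", "brute", "bruteforce", "brute-force"]):
--         return "BruteForce"
--     # Web attacks (xss / sql injection / web attack)
--     if any(token in l for token in ["web attack", "xss", "sql", "injection"]):
--         return "WebAttack"
--     # fallback: keep original (capitalized)
--     return lbl
-- ===== SOURCE B (Python) =====
-- TOKEN_CATEGORY = [
--     ("ddos", "DDoS"),
--     ("distributed", "DoS"), ("dos", "DoS"), ("hulk", "DoS"),
--     ("goldeneye", "DoS"), ("slowloris", "DoS"), ("slowhttptest", "DoS"),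
--     ("portscan", "PortScan"), ("port scan", "PortScan"),
--     ("bot", "Bot"),
--     ("patator", "BruteForce"), ("brute", "BruteForce"),
--     ("bruteforce", "BruteForce"), ("brute-force", "BruteForce"),
--     ("web attack", "WebAttack"), ("xss", "WebAttack"),
--     ("sql", "WebAttack"), ("injection", "WebAttack"),
-- ]
-- PRIORITY = ["DDoS", "DoS", "PortScan", "Bot", "BruteForce", "WebAttack"]
--
--
-- def map_label_simple(lbl: str) -> str:
--     if lbl is None:
--         return "Other"
--     l = lbl.strip().lower()
--     if l == "benign":
--         return "BENIGN"
--     # stage 1: collect the full set of categories whose token occurs in l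
--     hits = {cat for tok, cat in TOKEN_CATEGORY if tok in l}
--     # stage 2: pick the highest-priority category among the hits
--     for cat in PRIORITY:
--         if cat in hits:
--             return cat
--     return lbl
-- ===== Notes on version B (the rewrite author's own statement) =====
-- stated objective: alternative
-- what changed: A's short-circuit if-ladder with a nested DDoS-vs-DoS branch is replaced by two staged passes: build the full SET of matching categories from a flat token-to-category table, then return the first category of a fixed priority list that is in the set (DDoS before DoS preserves the nested distinction).
import Mathlib
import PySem

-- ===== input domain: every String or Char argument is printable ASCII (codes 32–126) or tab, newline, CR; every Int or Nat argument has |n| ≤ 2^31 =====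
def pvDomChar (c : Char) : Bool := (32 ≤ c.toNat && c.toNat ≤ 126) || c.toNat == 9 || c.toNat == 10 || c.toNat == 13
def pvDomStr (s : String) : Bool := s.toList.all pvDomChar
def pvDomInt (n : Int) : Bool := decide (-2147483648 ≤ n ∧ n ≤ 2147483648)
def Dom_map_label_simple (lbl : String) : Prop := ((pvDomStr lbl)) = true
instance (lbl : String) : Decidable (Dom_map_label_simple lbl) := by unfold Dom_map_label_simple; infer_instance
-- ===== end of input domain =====

-- B replaces A's short-circuit if-ladder by two staged passes: collect the full SET of
-- matching categories from a flat token→category table, then pick the first category of a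
-- fixed priority order that is in the set; same return value everywhere.

-- ===== PORT A =====
def map_label_simple (lbl : String) : String :=
  let l := PySem.Str.lower (PySem.Str.strip lbl)
  if l == "benign" then "BENIGN"
  else if (["ddos", "distributed", "dos", "hulk", "goldeneye", "slowloris", "slowhttptest"].any
      (fun token => PySem.Str.isIn token l)) then
    (if PySem.Str.isIn "ddos" l then "DDoS" else "DoS")
  else if PySem.Str.isIn "portscan" l || PySem.Str.isIn "port scan" l then "PortScan"
  else if PySem.Str.isIn "bot" l then "Bot"
  else if (["patator", "brute", "bruteforce", "brute-force"].any
      (fun token => PySem.Str.isIn token l)) then "BruteForce"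
  else if (["web attack", "xss", "sql", "injection"].any
      (fun token => PySem.Str.isIn token l)) then "WebAttack"
  else lbl

-- ===== PORT B =====
def pvTokenCat : List (String × String) :=
  [("ddos", "DDoS"),
   ("distributed", "DoS"), ("dos", "DoS"), ("hulk", "DoS"),
   ("goldeneye", "DoS"), ("slowloris", "DoS"), ("slowhttptest", "DoS"),
   ("portscan", "PortScan"), ("port scan", "PortScan"),
   ("bot", "Bot"),
   ("patator", "BruteForce"), ("brute", "BruteForce"),
   ("bruteforce", "BruteForce"), ("brute-force", "BruteForce"),
   ("web attack", "WebAttack"), ("xss", "WebAttack"),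
   ("sql", "WebAttack"), ("injection", "WebAttack")]

def pvPriority : List String := ["DDoS", "DoS", "PortScan", "Bot", "BruteForce", "WebAttack"]

-- stage 1: the set comprehension {cat for tok, cat in TOKEN_CATEGORY if tok in l}
def pvHits (l : String) : PySem.Set String :=
  pvTokenCat.foldl (fun acc tc => if PySem.Str.isIn tc.1 l then PySem.Set.add acc tc.2 else acc)
    PySem.Set.empty

-- stage 2: the 'for cat in PRIORITY' loop (membership tests only; order-safe on a Set)
def pvSelect (hits : PySem.Set String) (fallback : String) : List String → String
  | [] => fallback
  | c :: cs => if PySem.Set.contains hits c then c else pvSelect hits fallback cs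

def map_label_simple_alt (lbl : String) : String :=
  let l := PySem.Str.lower (PySem.Str.strip lbl)
  if l == "benign" then "BENIGN"
  else pvSelect (pvHits l) lbl pvPriority

-- ===== PRECONDITION & SPEC =====
def Spec_map_label_simple (lbl : String) (out : String) : Prop := out = map_label_simple_alt lbl
instance (lbl : String) (out : String) : Decidable (Spec_map_label_simple lbl out) := by unfold Spec_map_label_simple; infer_instance

-- ===== CLAIM (what is proved, stated in full; the proofs are below) =====
def Claim_equal_map_label_simple : Prop := ∀ (lbl : String), Dom_map_label_simple lbl → Spec_map_label_simple lbl (map_label_simple lbl)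

-- ===== LEMMAS AND PROOFS =====

-- membership in the conditionally-added fold that builds the hits set
theorem pv_mem_foldl (q : String → Bool) (ps : List (String × String))
    (s : PySem.Set String) (x : String) :
    x ∈ ps.foldl (fun acc tc => if q tc.1 then PySem.Set.add acc tc.2 else acc) s
    ↔ x ∈ s ∨ ∃ tc ∈ ps, q tc.1 = true ∧ tc.2 = x := by
  induction ps generalizing s with
  | nil => simp
  | cons tc rest ih =>
      rw [List.foldl_cons]
      cases hq : q tc.1
      · simp only [ih]; simp [hq]
      · simp only [ih]; simp [hq, PySem.Set.mem_add]; tauto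

-- the six category-membership facts about the hits set
theorem pv_hits_DDoS (l : String) :
    PySem.Set.contains (pvHits l) "DDoS" = PySem.Str.isIn "ddos" l := by
  rw [Bool.eq_iff_iff, PySem.Set.contains_iff, pvHits, pv_mem_foldl (fun t => PySem.Str.isIn t l)]
  simp [pvTokenCat]

theorem pv_hits_DoS (l : String) :
    PySem.Set.contains (pvHits l) "DoS"
    = (PySem.Str.isIn "distributed" l || PySem.Str.isIn "dos" l || PySem.Str.isIn "hulk" l ||
       PySem.Str.isIn "goldeneye" l || PySem.Str.isIn "slowloris" l ||
       PySem.Str.isIn "slowhttptest" l) := by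
  rw [Bool.eq_iff_iff, PySem.Set.contains_iff, pvHits, pv_mem_foldl (fun t => PySem.Str.isIn t l)]
  simp [pvTokenCat]
  tauto

theorem pv_hits_PortScan (l : String) :
    PySem.Set.contains (pvHits l) "PortScan"
    = (PySem.Str.isIn "portscan" l || PySem.Str.isIn "port scan" l) := by
  rw [Bool.eq_iff_iff, PySem.Set.contains_iff, pvHits, pv_mem_foldl (fun t => PySem.Str.isIn t l)]
  simp [pvTokenCat]

theorem pv_hits_Bot (l : String) :
    PySem.Set.contains (pvHits l) "Bot" = PySem.Str.isIn "bot" l := by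
  rw [Bool.eq_iff_iff, PySem.Set.contains_iff, pvHits, pv_mem_foldl (fun t => PySem.Str.isIn t l)]
  simp [pvTokenCat]

theorem pv_hits_BruteForce (l : String) :
    PySem.Set.contains (pvHits l) "BruteForce"
    = (PySem.Str.isIn "patator" l || PySem.Str.isIn "brute" l ||
       PySem.Str.isIn "bruteforce" l || PySem.Str.isIn "brute-force" l) := by
  rw [Bool.eq_iff_iff, PySem.Set.contains_iff, pvHits, pv_mem_foldl (fun t => PySem.Str.isIn t l)]
  simp [pvTokenCat]
  tauto

theorem pv_hits_WebAttack (l : String) :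
    PySem.Set.contains (pvHits l) "WebAttack"
    = (PySem.Str.isIn "web attack" l || PySem.Str.isIn "xss" l ||
       PySem.Str.isIn "sql" l || PySem.Str.isIn "injection" l) := by
  rw [Bool.eq_iff_iff, PySem.Set.contains_iff, pvHits, pv_mem_foldl (fun t => PySem.Str.isIn t l)]
  simp [pvTokenCat]
  tauto

-- ===== VERDICT (by name: the statement is the Claim_ definition above) =====
theorem map_label_simple_spec : Claim_equal_map_label_simple := by
  intro lbl _
  unfold Spec_map_label_simple map_label_simple map_label_simple_alt
  simp only [pvSelect, pvPriority, pv_hits_DDoS, pv_hits_DoS, pv_hits_PortScan, pv_hits_Bot,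
    pv_hits_BruteForce, pv_hits_WebAttack, List.any_cons, List.any_nil, Bool.or_false]
  by_cases hb : (PySem.Str.lower (PySem.Str.strip lbl) == "benign") = true
  · simp [hb]
  · by_cases hd : PySem.Chars.isIn ['d', 'd', 'o', 's']
        (PySem.Chars.lower (PySem.Chars.strip lbl.toList)) = true <;>
      simp [hb, hd, or_assoc]
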